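-- pv_equiv track=rewrite | github.com/AdamZhouSE/pythonHomework | Code/CodeRecords/2415/60634/286432.py | LRV
-- ===== SOURCE A (Python) =====
-- def LRV(node,arr):
--     if len(arr) == 0:
--         return 1
--     elif len(arr) == 1:
--         return arr[node]
--     maxL = 1
--     maxR = 1
--     lTree = arr[0:node]
--     rTree = arr[node+1:len(arr)]
--     for x in range(len(lTree)):
--         temp = LRV(x,lTree)
--         if temp > maxL:
--             maxL = temp
--     for x in range(len(rTree)):
--         temp = LRV(x,rTree)
--         if temp > maxR:
--             maxR = temp
--     return maxL * maxR + arr[node]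
-- ===== SOURCE B (Python) =====
-- def LRV(node, arr):
--     # Bottom-up interval DP: best[(i, j)] = max(1, best value of any tree over arr[i:j]).
--     n = len(arr)
--     if n == 0:
--         return 1
--     if n == 1:
--         return arr[node]
--     best = {}
--     for i in range(n + 1):
--         best[(i, i)] = 1
--     for length in range(1, n + 1):
--         for i in range(n - length + 1):
--             j = i + length
--             b = 1
--             for k in range(i, j):
--                 if length == 1:
--                     v = arr[k]
--                 else:
--                     v = best[(i, k)] * best[(k + 1, j)] + arr[k]
--                 if v > b:
--                     b = v
--             best[(i, j)] = b
--     return best[(0, node)] * best[(node + 1, n)] + arr[node]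
-- ===== Notes on version B (the rewrite author's own statement) =====
-- stated objective: faster
-- what changed: Replaces A's exponential recursion over subtree splits by a bottom-up interval dynamic program: a dict best[(i,j)] holds the best value over arr[i:j], filled by increasing interval length, so each interval is computed once instead of exponentially many times.
-- outside the precondition, e.g. on LRV(-1, [2, 3]): A returns 13, B raises KeyError
import Mathlib
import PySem

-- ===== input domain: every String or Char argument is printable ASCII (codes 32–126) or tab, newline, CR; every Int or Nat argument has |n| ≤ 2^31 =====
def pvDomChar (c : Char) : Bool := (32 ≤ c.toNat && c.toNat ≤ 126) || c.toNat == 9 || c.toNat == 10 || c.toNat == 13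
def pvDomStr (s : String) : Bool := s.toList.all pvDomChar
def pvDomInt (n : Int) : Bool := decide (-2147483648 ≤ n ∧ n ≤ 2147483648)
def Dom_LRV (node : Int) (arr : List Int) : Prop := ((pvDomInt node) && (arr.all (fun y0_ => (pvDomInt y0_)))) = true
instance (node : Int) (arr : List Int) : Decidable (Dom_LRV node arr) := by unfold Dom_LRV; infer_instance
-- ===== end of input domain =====

-- B replaces A's exponential recursion over subtree splits by a bottom-up interval DP
-- (dict best[(i,j)] = best value over arr[i:j]), computing each interval once.


-- ===== PORT A =====
-- (literal port; the Nat fuel argument of LRVgo only makes the recursion total: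
--  LRVgo_irrel below shows the fuel 2*len(arr)+2 is never exhausted)
def LRVgo : Nat → Int → List Int → Int
  | 0, _, _ => 0
  | fuel+1, node, arr =>
    if arr.length == 0 then 1
    else if arr.length == 1 then (PySem.List.pyGet? arr node).getD 0
    else
      let lTree := PySem.List.slice arr (some 0) (some node)
      let rTree := PySem.List.slice arr (some (node + 1)) (some (arr.length : Int))
      let maxL := (PySem.List.pyRange 0 (lTree.length : Int) 1).foldl
        (fun m x => let temp := LRVgo fuel x lTree; if temp > m then temp else m) 1
      let maxR := (PySem.List.pyRange 0 (rTree.length : Int) 1).foldl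
        (fun m x => let temp := LRVgo fuel x rTree; if temp > m then temp else m) 1
      maxL * maxR + (PySem.List.pyGet? arr node).getD 0

def LRV (node : Int) (arr : List Int) : Int := LRVgo (2 * arr.length + 2) node arr

-- ===== PORT B =====
def LRV_alt (node : Int) (arr : List Int) : Int :=
  let n : Int := (arr.length : Int)
  if n == 0 then 1
  else if n == 1 then (PySem.List.pyGet? arr node).getD 0
  else
    let best : PySem.Dict (Int × Int) Int := PySem.Dict.empty
    let best := (PySem.List.pyRange 0 (n + 1) 1).foldl (fun d i => d.insert (i, i) 1) best
    let best := (PySem.List.pyRange 1 (n + 1) 1).foldl (fun d length =>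
      (PySem.List.pyRange 0 (n - length + 1) 1).foldl (fun d i =>
        let j := i + length
        let b := (PySem.List.pyRange i j 1).foldl (fun b k =>
          let v := if length == 1 then (PySem.List.pyGet? arr k).getD 0
                   else d.getD (i, k) 0 * d.getD (k + 1, j) 0 + (PySem.List.pyGet? arr k).getD 0
          if v > b then v else b) 1
        d.insert (i, j) b) d) best
    best.getD (0, node) 0 * best.getD (node + 1, n) 0 + (PySem.List.pyGet? arr node).getD 0

-- ===== PRECONDITION & SPEC =====
-- Pre_ excludes negative node (A mixes Python's wraparound indexing with non-wrapping slices
-- there while B raises KeyError) and out-of-range node (where A raises IndexError).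
def Pre_LRV (node : Int) (arr : List Int) : Prop := arr = [] ∨ (0 ≤ node ∧ node < (arr.length : Int))
instance (node : Int) (arr : List Int) : Decidable (Pre_LRV node arr) := by unfold Pre_LRV; infer_instance
def pvWitness_LRV : Int × List Int := (1, [3, -2, 5])

def Spec_LRV (node : Int) (arr : List Int) (out : Int) : Prop := out = LRV_alt node arr
instance (node : Int) (arr : List Int) (out : Int) : Decidable (Spec_LRV node arr out) := by unfold Spec_LRV; infer_instance

-- ===== CLAIM (what is proved, stated in full; the proofs are below) =====
def Claim_equal_LRV : Prop := ∀ (node : Int) (arr : List Int), Dom_LRV node arr → Pre_LRV node arr → Spec_LRV node arr (LRV node arr)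

-- ===== LEMMAS AND PROOFS =====

-- measure/fuel bookkeeping for port A
def pvMeas (node : Int) (arr : List Int) : Nat :=
  2 * arr.length + (if 0 ≤ node ∧ node < (arr.length : Int) then 0 else 1)

theorem pvSliceL_le (arr : List Int) (node : Int) :
    (PySem.List.slice arr (some 0) (some node)).length ≤ arr.length := by
  rw [PySem.List.length_slice]
  have := PySem.List.clampIdx_le arr.length node
  omega

theorem pvSliceR_le (arr : List Int) (node : Int) :
    (PySem.List.slice arr (some (node + 1)) (some (arr.length : Int))).length ≤ arr.length := by
  rw [PySem.List.length_slice]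
  have := PySem.List.clampIdx_le arr.length (arr.length : Int)
  omega

theorem pvSliceL_lt (arr : List Int) (node : Int) (hv : 0 ≤ node ∧ node < (arr.length : Int)) :
    (PySem.List.slice arr (some 0) (some node)).length < arr.length := by
  rw [PySem.List.length_slice]
  have e1 : PySem.List.clampIdx arr.length node = min node.toNat arr.length := by
    rw [← Int.toNat_of_nonneg hv.1, PySem.List.clampIdx_natCast]
    omega
  omega

theorem pvSliceR_lt (arr : List Int) (node : Int) (hv : 0 ≤ node ∧ node < (arr.length : Int)) :
    (PySem.List.slice arr (some (node + 1)) (some (arr.length : Int))).length < arr.length := by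
  rw [PySem.List.length_slice]
  have e1 : PySem.List.clampIdx arr.length (node + 1) = min (node + 1).toNat arr.length := by
    rw [← Int.toNat_of_nonneg (by omega : (0:Int) ≤ node + 1), PySem.List.clampIdx_natCast]
    omega
  have e2 : PySem.List.clampIdx arr.length ((arr.length : Nat) : Int) = arr.length := by
    rw [PySem.List.clampIdx_natCast]
    omega
  omega

-- the fuel never runs out: above the measure, LRVgo does not depend on the fuel
theorem LRVgo_irrel : ∀ (k : Nat) (node : Int) (arr : List Int) (f g : Nat),
    pvMeas node arr ≤ k → pvMeas node arr < f → pvMeas node arr < g →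
    LRVgo f node arr = LRVgo g node arr := by
  intro k
  induction k with
  | zero =>
    intro node arr f g h1 _ _
    unfold pvMeas at h1
    split_ifs at h1 <;> omega
  | succ k ih =>
    intro node arr f g h1 h2 h3
    obtain ⟨f', rfl⟩ : ∃ f', f = f' + 1 := ⟨f - 1, by omega⟩
    obtain ⟨g', rfl⟩ : ∃ g', g = g' + 1 := ⟨g - 1, by omega⟩
    rw [LRVgo, LRVgo]
    by_cases h0 : (arr.length == 0) = true
    · rw [if_pos h0, if_pos h0]
    · rw [if_neg h0, if_neg h0]
      by_cases hone : (arr.length == 1) = true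
      · rw [if_pos hone, if_pos hone]
      · rw [if_neg hone, if_neg hone]
        simp only []
        have hchild : ∀ (s : List Int) (hle : s.length ≤ arr.length)
            (hlt : (0 ≤ node ∧ node < (arr.length : Int)) → s.length < arr.length)
            (x : Int), x ∈ PySem.List.pyRange 0 (s.length : Int) 1 →
            LRVgo f' x s = LRVgo g' x s := by
          intro s hle hlt x hx
          rw [PySem.List.mem_pyRange_one] at hx
          have hm : pvMeas x s = 2 * s.length := by
            unfold pvMeas
            rw [if_pos hx]
            omega
          have hms : pvMeas x s < pvMeas node arr := by
            unfold pvMeas at *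
            split_ifs at * with hv
            · have := hlt hv; omega
            · omega
          exact ih x s f' g' (by omega) (by omega) (by omega)
        have eL : (PySem.List.pyRange 0 (((PySem.List.slice arr (some 0) (some node)).length : Nat) : Int) 1).foldl
            (fun m x => if LRVgo f' x (PySem.List.slice arr (some 0) (some node)) > m
                        then LRVgo f' x (PySem.List.slice arr (some 0) (some node)) else m) 1 =
            (PySem.List.pyRange 0 (((PySem.List.slice arr (some 0) (some node)).length : Nat) : Int) 1).foldl
            (fun m x => if LRVgo g' x (PySem.List.slice arr (some 0) (some node)) > m
                        then LRVgo g' x (PySem.List.slice arr (some 0) (some node)) else m) 1 := by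
          apply PySem.List.foldl_congr_mem
          intro m x hx
          rw [hchild _ (pvSliceL_le arr node) (fun hv => pvSliceL_lt arr node hv) x hx]
        have eR : (PySem.List.pyRange 0 (((PySem.List.slice arr (some (node + 1)) (some (arr.length : Int))).length : Nat) : Int) 1).foldl
            (fun m x => if LRVgo f' x (PySem.List.slice arr (some (node + 1)) (some (arr.length : Int))) > m
                        then LRVgo f' x (PySem.List.slice arr (some (node + 1)) (some (arr.length : Int))) else m) 1 =
            (PySem.List.pyRange 0 (((PySem.List.slice arr (some (node + 1)) (some (arr.length : Int))).length : Nat) : Int) 1).foldl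
            (fun m x => if LRVgo g' x (PySem.List.slice arr (some (node + 1)) (some (arr.length : Int))) > m
                        then LRVgo g' x (PySem.List.slice arr (some (node + 1)) (some (arr.length : Int))) else m) 1 := by
          apply PySem.List.foldl_congr_mem
          intro m x hx
          rw [hchild _ (pvSliceR_le arr node) (fun hv => pvSliceR_lt arr node hv) x hx]
        rw [eL, eR]

-- A's running-max loop over all roots of a segment, as a named function.
def pvMseg (seg : List Int) : Int :=
  (PySem.List.pyRange 0 (seg.length : Int) 1).foldl
    (fun m x => let temp := LRV x seg; if temp > m then temp else m) 1

-- the contiguous segment arr[i:j]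
def pvSeg (arr : List Int) (i j : Nat) : List Int := (arr.drop i).take (j - i)

-- B's inner k-loop, middle i-loop and outer length-loop, as named functions (defeq to the closures in LRV_alt).
def pvInner (arr : List Int) (d : PySem.Dict (Int × Int) Int) (length i j : Int) : Int :=
  (PySem.List.pyRange i j 1).foldl (fun b k =>
      let v := if length == 1 then (PySem.List.pyGet? arr k).getD 0
               else d.getD (i, k) 0 * d.getD (k + 1, j) 0 + (PySem.List.pyGet? arr k).getD 0
      if v > b then v else b) 1

def pvMid (arr : List Int) (n length : Int) (d : PySem.Dict (Int × Int) Int) : PySem.Dict (Int × Int) Int :=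
  (PySem.List.pyRange 0 (n - length + 1) 1).foldl
    (fun d i => d.insert (i, i + length) (pvInner arr d length i (i + length))) d

def pvOuter (arr : List Int) (n : Int) (d : PySem.Dict (Int × Int) Int) : PySem.Dict (Int × Int) Int :=
  (PySem.List.pyRange 1 (n + 1) 1).foldl (fun d length => pvMid arr n length d) d

def pvInit (n : Int) : PySem.Dict (Int × Int) Int :=
  (PySem.List.pyRange 0 (n + 1) 1).foldl (fun d i => d.insert (i, i) 1) PySem.Dict.empty

-- dict invariant: every interval of length < L, and of length L starting below I, is correctly tabulated
def pvInv (arr : List Int) (d : PySem.Dict (Int × Int) Int) (L I : Nat) : Prop :=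
  ∀ i j : Nat, j ≤ arr.length → i ≤ j → (j - i < L ∨ (j - i = L ∧ i < I)) →
    d.get? ((i:Int), (j:Int)) = some (pvMseg (pvSeg arr i j))

theorem pvMseg_nil : pvMseg [] = 1 := by
  simp [pvMseg, PySem.List.pyRange_one_eq_nil]

theorem pvSeg_length (arr : List Int) (i j : Nat) (hj : j ≤ arr.length) :
    (pvSeg arr i j).length = j - i := by
  simp [pvSeg]; omega

theorem LRV_unfold (node : Int) (arr : List Int) (h2 : 2 ≤ arr.length) :
    LRV node arr =
      pvMseg (PySem.List.slice arr (some 0) (some node)) *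
      pvMseg (PySem.List.slice arr (some (node + 1)) (some (arr.length : Int))) +
      (PySem.List.pyGet? arr node).getD 0 := by
  rw [LRV, show 2 * arr.length + 2 = (2 * arr.length + 1) + 1 from rfl, LRVgo]
  rw [if_neg (by simp only [beq_iff_eq]; omega), if_neg (by simp only [beq_iff_eq]; omega)]
  simp only []
  unfold pvMseg
  have step : ∀ (s : List Int), s.length ≤ arr.length →
      (PySem.List.pyRange 0 ((s.length : Nat) : Int) 1).foldl
        (fun m x => if LRVgo (2 * arr.length + 1) x s > m then LRVgo (2 * arr.length + 1) x s else m) 1 =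
      (PySem.List.pyRange 0 ((s.length : Nat) : Int) 1).foldl
        (fun m x => let temp := LRV x s; if temp > m then temp else m) 1 := by
    intro s hle
    apply PySem.List.foldl_congr_mem
    intro m x hx
    rw [PySem.List.mem_pyRange_one] at hx
    have hm : pvMeas x s = 2 * s.length := by
      unfold pvMeas
      rw [if_pos hx]
      omega
    simp only [LRV]
    rw [LRVgo_irrel (pvMeas x s) x s (2 * arr.length + 1) (2 * s.length + 2) le_rfl (by omega) (by omega)]
  rw [step _ (pvSliceL_le arr node), step _ (pvSliceR_le arr node)]

theorem pvSeg_get (arr : List Int) (i j x : Nat) (hj : j ≤ arr.length) (hx : x < j - i) :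
    (PySem.List.pyGet? (pvSeg arr i j) (x : Int)).getD 0 = arr.getD (i + x) 0 := by
  rw [PySem.List.pyGet?_natCast]
  unfold pvSeg
  rw [List.getElem?_take_of_lt hx, List.getElem?_drop, ← List.getD_eq_getElem?_getD]

theorem pvSeg_take (arr : List Int) (i j x : Nat) (hx : x ≤ j - i) :
    (pvSeg arr i j).take x = pvSeg arr i (i + x) := by
  unfold pvSeg
  rw [List.take_take]
  congr 1
  omega

theorem pvSeg_drop (arr : List Int) (i j x : Nat) :
    ((pvSeg arr i j).drop (x + 1)).take (j - i - (x + 1)) = pvSeg arr (i + x + 1) j := by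
  unfold pvSeg
  rw [List.drop_take, List.drop_drop, List.take_take]
  congr 1
  omega

theorem LRV_seg (arr : List Int) (i j x : Nat) (hj : j ≤ arr.length) (hx : x < j - i) :
    LRV (x : Int) (pvSeg arr i j) =
      if j - i = 1 then arr.getD (i + x) 0
      else pvMseg (pvSeg arr i (i + x)) * pvMseg (pvSeg arr (i + x + 1) j) + arr.getD (i + x) 0 := by
  have hlen : (pvSeg arr i j).length = j - i := pvSeg_length arr i j hj
  by_cases h1 : j - i = 1
  · have hx0 : x = 0 := by omega
    subst hx0
    rw [if_pos h1, LRV, show 2 * (pvSeg arr i j).length + 2 = (2 * (pvSeg arr i j).length + 1) + 1 from rfl, LRVgo]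
    rw [if_neg (by simp only [beq_iff_eq]; omega), if_pos (by simp only [beq_iff_eq]; omega)]
    exact_mod_cast pvSeg_get arr i j 0 hj hx
  · have h2seg : 2 ≤ (pvSeg arr i j).length := by omega
    rw [if_neg h1, LRV_unfold _ _ h2seg]
    have eL : PySem.List.slice (pvSeg arr i j) (some 0) (some (x : Int)) = pvSeg arr i (i + x) := by
      rw [PySem.List.slice_zero_start, PySem.List.slice_to_natCast, pvSeg_take arr i j x (by omega)]
    have eR : PySem.List.slice (pvSeg arr i j) (some ((x : Int) + 1)) (some ((pvSeg arr i j).length : Int)) =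
        pvSeg arr (i + x + 1) j := by
      rw [hlen]
      rw [show ((x : Int) + 1) = ((x + 1 : Nat) : Int) by push_cast; ring]
      rw [PySem.List.slice_natCast]
      rw [show (j - i - (x + 1) : Nat) = (j - i) - (x+1) by omega]
      exact pvSeg_drop arr i j x
    rw [eL, eR, pvSeg_get arr i j x hj hx]

theorem pvInit_get (a b : Int) (d : PySem.Dict (Int × Int) Int) (i : Int) :
    (((PySem.List.pyRange a b 1).foldl (fun d x => d.insert (x, x) 1) d).get? (i, i)) =
      if a ≤ i ∧ i < b then some 1 else d.get? (i, i) := by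
  by_cases hab : a < b
  · rw [PySem.List.pyRange_one_cons hab, List.foldl_cons, pvInit_get (a+1) b]
    rw [PySem.Dict.get?_insert]
    simp only [Prod.mk.injEq, and_self]
    split_ifs <;> first | rfl | omega
  · rw [PySem.List.pyRange_one_eq_nil (by omega), List.foldl_nil, if_neg (by omega)]
termination_by (b - a).toNat
decreasing_by omega

theorem pvInv_init (arr : List Int) : pvInv arr (pvInit (arr.length : Int)) 1 0 := by
  intro i j hj hij hcond
  have hij' : i = j := by omega
  subst hij'
  unfold pvInit
  rw [pvInit_get, if_pos (by omega)]
  have h0 : pvSeg arr i i = [] := by simp [pvSeg]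
  rw [h0]
  simp [pvMseg_nil]

theorem pvInner_eq (arr : List Int) (d : PySem.Dict (Int × Int) Int) (L i : Nat)
    (hL : 1 ≤ L) (hin : i + L ≤ arr.length) (hInv : pvInv arr d L 0) :
    pvInner arr d (L : Int) (i : Int) ((i : Int) + (L : Int)) = pvMseg (pvSeg arr i (i + L)) := by
  have hlen : (pvSeg arr i (i + L)).length = (i + L) - i := pvSeg_length arr i (i + L) hin
  unfold pvInner pvMseg
  rw [hlen, show ((i + L) - i : Nat) = L by omega]
  rw [PySem.List.pyRange_one (i : Int) ((i : Int) + (L : Int)), PySem.List.pyRange_one 0 (L : Int)]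
  rw [show (((i : Int) + (L : Int)) - (i : Int)).toNat = L by omega,
      show ((L : Int) - 0).toNat = L by omega]
  rw [List.foldl_map, List.foldl_map]
  apply PySem.List.foldl_congr_mem
  intro b x hxmem
  have hx : x < L := List.mem_range.mp hxmem
  simp only [zero_add]
  have e1 : (PySem.List.pyGet? arr ((i : Int) + (x : Int))).getD 0 = arr.getD (i + x) 0 := by
    rw [show (i : Int) + (x : Int) = ((i + x : Nat) : Int) by push_cast; ring,
        PySem.List.pyGet?_natCast, ← List.getD_eq_getElem?_getD]
  by_cases hL1 : L = 1
  · have e2 : LRV ((x : Nat) : Int) (pvSeg arr i (i + L)) = arr.getD (i + x) 0 := by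
      rw [LRV_seg arr i (i + L) x hin (by omega), if_pos (by omega)]
    have hc : ((L : Int) == 1) = true := by simp only [beq_iff_eq]; omega
    rw [e1, e2]
    simp only [hc, if_true]
  · have g1 : d.getD ((i : Int), (i : Int) + (x : Int)) 0 = pvMseg (pvSeg arr i (i + x)) := by
      have hh := hInv i (i + x) (by omega) (by omega) (by omega)
      rw [show (i : Int) + (x : Int) = ((i + x : Nat) : Int) by push_cast; ring,
          PySem.Dict.getD_eq_get?_getD, hh]
      rfl
    have g2 : d.getD ((i : Int) + (x : Int) + 1, (i : Int) + (L : Int)) 0 =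
        pvMseg (pvSeg arr (i + x + 1) (i + L)) := by
      have hh := hInv (i + x + 1) (i + L) hin (by omega) (by omega)
      rw [show (i : Int) + (x : Int) + 1 = ((i + x + 1 : Nat) : Int) by push_cast; ring,
          show (i : Int) + (L : Int) = ((i + L : Nat) : Int) by push_cast; ring,
          PySem.Dict.getD_eq_get?_getD, hh]
      rfl
    have e2 : LRV ((x : Nat) : Int) (pvSeg arr i (i + L)) =
        pvMseg (pvSeg arr i (i + x)) * pvMseg (pvSeg arr (i + x + 1) (i + L)) + arr.getD (i + x) 0 := by
      rw [LRV_seg arr i (i + L) x hin (by omega), if_neg (by omega)]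
    have hc : ((L : Int) == 1) = false := by simp only [beq_eq_false_iff_ne, ne_eq]; omega
    rw [g1, g2, e1, e2]
    simp only [hc, Bool.false_eq_true, if_false]

theorem pvMid_inv (arr : List Int) (L : Nat) (hL : 1 ≤ L) (hLn : L ≤ arr.length) :
    ∀ (cnt I : Nat) (d : PySem.Dict (Int × Int) Int), I + cnt = arr.length - L + 1 →
      pvInv arr d L I →
      pvInv arr (((PySem.List.pyRange (I : Int) ((arr.length : Int) - (L : Int) + 1) 1).foldl
        (fun d i => d.insert (i, i + (L : Int)) (pvInner arr d (L : Int) i (i + (L : Int)))) d))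
        L (arr.length - L + 1) := by
  intro cnt
  induction cnt with
  | zero =>
    intro I d hcnt hInv
    rw [PySem.List.pyRange_one_eq_nil (by omega), List.foldl_nil]
    have hIeq : I = arr.length - L + 1 := by omega
    rwa [hIeq] at hInv
  | succ n ih =>
    intro I d hcnt hInv
    rw [PySem.List.pyRange_one_cons (by omega), List.foldl_cons]
    have hIL : I + L ≤ arr.length := by omega
    have hweak : pvInv arr d L 0 := fun a b h1 h2 h3 => hInv a b h1 h2 (by omega)
    have hval := pvInner_eq arr d L I hL hIL hweak
    have hnew : pvInv arr
        (d.insert ((I : Int), (I : Int) + (L : Int)) (pvInner arr d (L : Int) (I : Int) ((I : Int) + (L : Int))))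
        L (I + 1) := by
      intro a b h1 h2 h3
      rw [PySem.Dict.get?_insert]
      by_cases hab : a = I ∧ b = I + L
      · rw [if_pos (by obtain ⟨ha, hb⟩ := hab; subst ha; subst hb; rw [Prod.mk.injEq]; push_cast; omega)]
        rw [hval, hab.1, hab.2]
      · rw [if_neg (by
          intro heq
          rw [Prod.mk.injEq] at heq
          obtain ⟨h1', h2'⟩ := heq
          exact hab ⟨by omega, by omega⟩)]
        exact hInv a b h1 h2 (by omega)
    have hres := ih (I + 1) _ (by omega) hnew
    rw [show ((I : Int) + 1) = ((I + 1 : Nat) : Int) by push_cast; ring]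
    exact hres

theorem pvOuter_inv (arr : List Int) :
    ∀ (cnt L : Nat) (d : PySem.Dict (Int × Int) Int), 1 ≤ L → L + cnt = arr.length + 1 →
      pvInv arr d L 0 →
      pvInv arr (((PySem.List.pyRange (L : Int) ((arr.length : Int) + 1) 1).foldl
        (fun d length => pvMid arr (arr.length : Int) length d) d)) (arr.length + 1) 0 := by
  intro cnt
  induction cnt with
  | zero =>
    intro L d hL hcnt hInv
    rw [PySem.List.pyRange_one_eq_nil (by omega), List.foldl_nil]
    have hLeq : L = arr.length + 1 := by omega
    rwa [hLeq] at hInv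
  | succ n ih =>
    intro L d hL hcnt hInv
    rw [PySem.List.pyRange_one_cons (by omega), List.foldl_cons]
    have hmid := pvMid_inv arr L hL (by omega) (arr.length - L + 1) 0 d (by omega) hInv
    simp only [Nat.cast_zero] at hmid
    have hnext : pvInv arr (pvMid arr (arr.length : Int) (L : Int) d) (L + 1) 0 := by
      intro a b h1 h2 h3
      unfold pvMid
      exact hmid a b h1 h2 (by omega)
    have hres := ih (L + 1) _ (by omega) (by omega) hnext
    rw [show ((L : Int) + 1) = ((L + 1 : Nat) : Int) by push_cast; ring]
    exact hres

theorem LRV_alt_eq (node : Int) (arr : List Int) (h2 : 2 ≤ arr.length) :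
    LRV_alt node arr =
      (pvOuter arr (arr.length : Int) (pvInit (arr.length : Int))).getD (0, node) 0 *
      (pvOuter arr (arr.length : Int) (pvInit (arr.length : Int))).getD (node + 1, (arr.length : Int)) 0 +
      (PySem.List.pyGet? arr node).getD 0 := by
  rw [LRV_alt]
  simp only []
  rw [if_neg (by simp only [beq_iff_eq]; omega), if_neg (by simp only [beq_iff_eq]; omega)]
  rfl

-- ===== VERDICT (by name: the statement is the Claim_ definition above) =====
theorem LRV_spec : Claim_equal_LRV := by
  unfold Claim_equal_LRV
  intro node arr _ hpre
  unfold Spec_LRV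
  rcases hpre with hnil | ⟨h0, hlt⟩
  · subst hnil
    rfl
  · by_cases hone : arr.length = 1
    · rw [LRV, show 2 * arr.length + 2 = (2 * arr.length + 1) + 1 from rfl, LRVgo, LRV_alt]
      simp only []
      rw [if_neg (by simp only [beq_iff_eq]; omega), if_pos (by simp only [beq_iff_eq]; omega),
          if_neg (by simp only [beq_iff_eq]; omega), if_pos (by simp only [beq_iff_eq]; omega)]
    · have h2 : 2 ≤ arr.length := by omega
      rw [LRV_unfold node arr h2, LRV_alt_eq node arr h2]
      have hInit := pvInv_init arr
      have hFin := pvOuter_inv arr arr.length 1 (pvInit (arr.length : Int)) (le_refl 1) (by omega) hInit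
      simp only [Nat.cast_one] at hFin
      have hO : pvInv arr (pvOuter arr (arr.length : Int) (pvInit (arr.length : Int))) (arr.length + 1) 0 := by
        unfold pvOuter
        exact hFin
      have hnode : node = (node.toNat : Int) := by omega
      have g1 : (pvOuter arr (arr.length : Int) (pvInit (arr.length : Int))).getD (0, node) 0 =
          pvMseg (pvSeg arr 0 node.toNat) := by
        have hh := hO 0 node.toNat (by omega) (by omega) (by omega)
        rw [hnode, show ((0 : Int), (node.toNat : Int)) = (((0 : Nat) : Int), ((node.toNat : Nat) : Int)) by norm_num]
        rw [PySem.Dict.getD_eq_get?_getD, hh]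
        rfl
      have g2 : (pvOuter arr (arr.length : Int) (pvInit (arr.length : Int))).getD (node + 1, (arr.length : Int)) 0 =
          pvMseg (pvSeg arr (node.toNat + 1) arr.length) := by
        have hh := hO (node.toNat + 1) arr.length (le_refl arr.length) (by omega) (by omega)
        rw [hnode, show ((node.toNat : Int) + 1) = ((node.toNat + 1 : Nat) : Int) by push_cast; ring]
        rw [PySem.Dict.getD_eq_get?_getD, hh]
        rfl
      have a1 : PySem.List.slice arr (some 0) (some node) = pvSeg arr 0 node.toNat := by
        rw [hnode, PySem.List.slice_zero_start, PySem.List.slice_to_natCast]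
        unfold pvSeg
        simp
        omega
      have a2 : PySem.List.slice arr (some (node + 1)) (some (arr.length : Int)) =
          pvSeg arr (node.toNat + 1) arr.length := by
        rw [hnode, show ((node.toNat : Int) + 1) = ((node.toNat + 1 : Nat) : Int) by push_cast; ring,
            PySem.List.slice_natCast]
        rfl
      rw [a1, a2, g1, g2]
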